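-- pv_equiv track=rewrite | github.com/mohamedbasuony/archai-layout-workspace | backend/app/agents/saia_ocr_agent.py | _collapse_single_char_runs
-- ===== SOURCE A (Python) =====
-- _FRAGMENT_RUN_MIN = 3
--
-- def _collapse_single_char_runs(
--     tokens: list[str],
--     func_words: set[str],
-- ) -> tuple[list[str], int]:
--     """Collapse runs of >= _FRAGMENT_RUN_MIN consecutive single-char tokens.
--
--     Runs of single-char tokens like "a a mno y a nis" indicate severe
--     segmentation failure. We collapse each such run into '[…]'.
--
--     Single-char tokens that are legitimate function words are still counted
--     in the run because the pattern "a a … a" is fragment noise, not real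
--     function words appearing consecutively.
--
--     Returns (new_tokens, replacement_count).
--     """
--     out: list[str] = []
--     replacements = 0
--     i = 0
--     n = len(tokens)
--     while i < n:
--         # Check if we're starting a run of single-char tokens
--         if len(tokens[i]) == 1 and tokens[i].isalpha():
--             # Count the run
--             run_end = i + 1
--             while run_end < n and len(tokens[run_end]) == 1 and tokens[run_end].isalpha():
--                 run_end += 1
--             run_len = run_end - i
--             if run_len >= _FRAGMENT_RUN_MIN:
--                 # Collapse the entire run to '[…]'
--                 out.append("[…]")
--                 replacements += run_len
--                 i = run_end
--                 continue
--         out.append(tokens[i])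
--         i += 1
--     return out, replacements
-- ===== SOURCE B (Python) =====
-- _FRAGMENT_RUN_MIN = 3
--
-- def _collapse_single_char_runs(
--     tokens: list[str],
--     func_words: set[str],
-- ) -> tuple[list[str], int]:
--     """Staged-pass version: flag tokens, DP run lengths right-to-left,
--     propagate full run length left-to-right, then decide each token on its own."""
--     # Pass 1: flag single-char alphabetic tokens.
--     flags = [len(t) == 1 and t.isalpha() for t in tokens]
--     # Pass 2 (right to left): length of the flagged block starting at each position.
--     runlen = [0] * len(tokens)
--     nxt = 0
--     for i in range(len(tokens) - 1, -1, -1):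
--         nxt = nxt + 1 if flags[i] else 0
--         runlen[i] = nxt
--     # Pass 3 (left to right): each token's fate depends only on its flag, its
--     # run's full length, and whether it starts the run.
--     out: list[str] = []
--     replacements = 0
--     prev_flag = False
--     prev_full = 0
--     for t, f, r in zip(tokens, flags, runlen):
--         full = prev_full if prev_flag else r
--         if not f or full < _FRAGMENT_RUN_MIN:
--             out.append(t)
--         else:
--             replacements += 1
--             if not prev_flag:
--                 out.append("[…]")
--         prev_flag, prev_full = f, full
--     return out, replacements
-- ===== Notes on version B (the rewrite author's own statement) =====
-- stated objective: alternative
-- what changed: Replaced the cursor loop with a nested run-counting while by three staged passes: flag each token, compute run lengths right-to-left by DP, then propagate each run's full length left-to-right and decide every token independently (keep it, start a '[…]', or drop it).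
import Mathlib
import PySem

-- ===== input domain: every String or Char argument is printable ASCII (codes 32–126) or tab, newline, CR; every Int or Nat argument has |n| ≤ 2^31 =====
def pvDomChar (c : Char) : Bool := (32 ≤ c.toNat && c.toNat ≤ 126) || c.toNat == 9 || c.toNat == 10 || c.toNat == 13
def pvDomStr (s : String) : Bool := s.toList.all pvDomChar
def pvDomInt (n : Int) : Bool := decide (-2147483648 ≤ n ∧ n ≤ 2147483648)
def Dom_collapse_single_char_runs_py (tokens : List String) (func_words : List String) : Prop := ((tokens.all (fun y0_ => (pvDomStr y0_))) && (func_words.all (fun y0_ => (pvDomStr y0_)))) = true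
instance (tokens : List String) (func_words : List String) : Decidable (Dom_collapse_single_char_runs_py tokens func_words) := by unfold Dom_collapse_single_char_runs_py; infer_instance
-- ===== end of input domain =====

-- B replaces A's cursor scan with a nested run-counting while by three staged array
-- passes (flag tokens; run lengths right-to-left by DP; propagate the full run length
-- left-to-right and decide each token on its own); alternative decomposition, same cost.

-- ===== PORT A =====
-- predicate "len(t) == 1 and t.isalpha()" (shared literal test, used by both ports)
def pvSingle (t : String) : Bool := PySem.Str.len t == 1 && PySem.Str.strIsalpha t

-- inner while: run_end advances while run_end < n and tokens[run_end] is single-char alpha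
-- (tokens.getD re "" is exact here: the index is a Nat and is guarded by re < n)
def pvRunEnd (tokens : List String) (n : Nat) (re : Nat) : Nat :=
  if h : re < n then
    if pvSingle (tokens.getD re "") then pvRunEnd tokens n (re + 1) else re
  else re
termination_by n - re

-- outer while over the cursor i, accumulating out and replacements
def pvLoopA (tokens : List String) (n : Nat) (i : Nat) (out : List String) (repl : Int) :
    List String × Int :=
  if h : i < n then
    let t := tokens.getD i ""
    if pvSingle t then
      let re := pvRunEnd tokens n (i + 1)
      if h2 : 3 ≤ re - i then
        pvLoopA tokens n re (out ++ ["[…]"]) (repl + ((re - i : Nat) : Int))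
      else pvLoopA tokens n (i + 1) (out ++ [t]) repl
    else pvLoopA tokens n (i + 1) (out ++ [t]) repl
  else (out, repl)
termination_by n - i
decreasing_by
  · omega
  · omega
  · omega

def collapse_single_char_runs_py (tokens : List String) (func_words : List String) : List String × Int :=
  pvLoopA tokens tokens.length 0 [] 0

-- ===== PORT B =====
-- pass 2: the backward loop "nxt = nxt + 1 if flags[i] else 0; runlen[i] = nxt"
-- as structural recursion from the right (nxt = head of the already-built suffix)
def pvRunlenB : List Bool → List Nat
  | [] => []
  | f :: fs =>
    let r := pvRunlenB fs
    (if f then r.headD 0 + 1 else 0) :: r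

-- pass 3: the zip loop with state (prev_flag, prev_full), accumulating out and replacements
def pvEmitB (l : List (String × Bool × Nat)) (prevFlag : Bool) (prevFull : Nat)
    (out : List String) (repl : Int) : List String × Int :=
  match l with
  | [] => (out, repl)
  | (t, f, r) :: rest =>
    let full := if prevFlag then prevFull else r
    if f = false ∨ full < 3 then pvEmitB rest f full (out ++ [t]) repl
    else if prevFlag = false then pvEmitB rest f full (out ++ ["[…]"]) (repl + 1)
    else pvEmitB rest f full out (repl + 1)

def collapse_single_char_runs_py_alt (tokens : List String) (func_words : List String) : List String × Int :=
  let flags := tokens.map pvSingle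
  let runlen := pvRunlenB flags
  pvEmitB (tokens.zip (flags.zip runlen)) false 0 [] 0

-- ===== PRECONDITION & SPEC =====
def Spec_collapse_single_char_runs_py (tokens : List String) (func_words : List String) (out : List String × Int) : Prop := out = collapse_single_char_runs_py_alt tokens func_words
instance (tokens : List String) (func_words : List String) (out : List String × Int) : Decidable (Spec_collapse_single_char_runs_py tokens func_words out) := by unfold Spec_collapse_single_char_runs_py; infer_instance

-- ===== CLAIM (what is proved, stated in full; the proofs are below) =====
def Claim_equal_collapse_single_char_runs_py : Prop := ∀ (tokens : List String) (func_words : List String), Dom_collapse_single_char_runs_py tokens func_words → Spec_collapse_single_char_runs_py tokens func_words (collapse_single_char_runs_py tokens func_words)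

-- ===== LEMMAS AND PROOFS =====

-- reference shape both proofs target: peel one maximal run (same pvSingle key) at a time
def pvGroups (l : List String) : List String × Int :=
  match l with
  | [] => ([], 0)
  | t :: rest =>
    let grp := t :: rest.takeWhile (fun x => pvSingle x == pvSingle t)
    let rest' := rest.dropWhile (fun x => pvSingle x == pvSingle t)
    let p := pvGroups rest'
    if pvSingle t && 3 ≤ grp.length then ("[…]" :: p.1, (grp.length : Int) + p.2)
    else (grp ++ p.1, p.2)
termination_by l.length
decreasing_by
  simp only [List.length_cons]
  have := List.Sublist.length_le (List.dropWhile_sublist (l := rest) (p := fun x => pvSingle x == pvSingle t))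
  omega

lemma pv_dropWhile_eq_drop (l : List String) (p : String → Bool) :
    l.drop (l.takeWhile p).length = l.dropWhile p := by
  induction l with
  | nil => rfl
  | cons a t ih => by_cases h : p a = true <;> simp [h, ih]

-- one-step unfolding of pvGroups on a cons cell
lemma pvGroups_cons_eq (t : String) (l : List String) :
    pvGroups (t :: l) =
      (let grp := t :: l.takeWhile (fun x => pvSingle x == pvSingle t)
       let p := pvGroups (l.dropWhile (fun x => pvSingle x == pvSingle t))
       if pvSingle t && 3 ≤ grp.length then ("[…]" :: p.1, (grp.length : Int) + p.2)
       else (grp ++ p.1, p.2)) := by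
  rw [pvGroups]

-- the inner while of A returns j plus the length of the single-char run starting at j
lemma pvRunEnd_eq (tokens : List String) (j : Nat) :
    pvRunEnd tokens tokens.length j = j + ((tokens.drop j).takeWhile pvSingle).length := by
  rw [pvRunEnd]
  by_cases hj : j < tokens.length
  · rw [dif_pos hj, List.getD_eq_getElem tokens "" hj, List.drop_eq_getElem_cons hj]
    by_cases hp : pvSingle tokens[j] = true
    · rw [if_pos hp, pvRunEnd_eq tokens (j + 1)]
      simp only [List.takeWhile_cons, hp, if_true, List.length_cons]
      omega
    · rw [if_neg hp]
      simp [Bool.eq_false_iff.mpr hp]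
  · rw [dif_neg hj]
    rw [List.drop_eq_nil_of_le (by omega)]
    simp
termination_by tokens.length - j

-- a group head that does not collapse contributes its head token, then the rest is grouped
lemma pvGroups_cons (t : String) (rest : List String)
    (h : pvSingle t = false ∨ (t :: rest.takeWhile pvSingle).length < 3) :
    pvGroups (t :: rest) = (t :: (pvGroups rest).1, (pvGroups rest).2) := by
  cases rest with
  | nil => simp [pvGroups]
  | cons u rs =>
    cases ht : pvSingle t with
    | false =>
      have key : (fun x => pvSingle x == pvSingle t) = (fun x => !pvSingle x) := by
        funext x; rw [ht]; simp
      cases hu : pvSingle u with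
      | true =>
        simp [pvGroups_cons_eq, ht, hu]
      | false =>
        have key' : (fun x => pvSingle x == pvSingle u) = (fun x => !pvSingle x) := by
          funext x; rw [hu]; simp
        simp [pvGroups_cons_eq, ht, hu]
    | true =>
      have hlen := h.resolve_left (by simp [ht])
      have key : (fun x => pvSingle x == pvSingle t) = pvSingle := by
        funext x; rw [ht]; simp
      cases hu : pvSingle u with
      | false =>
        simp [pvGroups_cons_eq, ht, hu]
      | true =>
        have key' : (fun x => pvSingle x == pvSingle u) = pvSingle := by
          funext x; rw [hu]; simp
        have htw : rs.takeWhile pvSingle = [] := by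
          rw [List.length_eq_zero_iff.symm]
          simp only [List.takeWhile_cons, hu, if_true, List.length_cons] at hlen
          omega
        simp [pvGroups_cons_eq, ht, hu, htw]

-- a collapsing run becomes one '[…]' plus its length
lemma pvGroups_collapse (t : String) (rest : List String) (ht : pvSingle t = true)
    (h3 : 3 ≤ 1 + (rest.takeWhile pvSingle).length) :
    pvGroups (t :: rest)
      = ("[…]" :: (pvGroups (rest.dropWhile pvSingle)).1,
         ((1 + (rest.takeWhile pvSingle).length : Nat) : Int)
           + (pvGroups (rest.dropWhile pvSingle)).2) := by
  have key : (fun x => pvSingle x == pvSingle t) = pvSingle := by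
    funext x; rw [ht]; simp
  rw [pvGroups_cons_eq]
  simp only [key]
  rw [if_pos (by simp [ht]; omega)]
  simp [Nat.add_comm]

-- A's cursor loop from index i computes "groups of the remaining suffix", accumulated
lemma pvLoopA_eq (tokens : List String) (m : Nat) :
    ∀ (i : Nat) (out : List String) (repl : Int), tokens.length - i ≤ m →
      pvLoopA tokens tokens.length i out repl
        = (out ++ (pvGroups (tokens.drop i)).1, repl + (pvGroups (tokens.drop i)).2) := by
  induction m with
  | zero =>
    intro i out repl h
    rw [pvLoopA, dif_neg (by omega), List.drop_eq_nil_of_le (by omega)]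
    simp [pvGroups]
  | succ m ih =>
    intro i out repl h
    by_cases hi : i < tokens.length
    · rw [pvLoopA, dif_pos hi]
      simp only [List.getD_eq_getElem tokens "" hi, pvRunEnd_eq tokens (i + 1)]
      rw [List.drop_eq_getElem_cons hi]
      by_cases hp : pvSingle tokens[i] = true
      · rw [if_pos hp]
        by_cases h3 : 3 ≤ (i + 1 + ((tokens.drop (i + 1)).takeWhile pvSingle).length) - i
        · rw [dif_pos h3, ih _ _ _ (by omega)]
          have hdd : tokens.drop (i + 1 + ((tokens.drop (i + 1)).takeWhile pvSingle).length)
              = (tokens.drop (i + 1)).dropWhile pvSingle := by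
            rw [← pv_dropWhile_eq_drop (tokens.drop (i + 1)) pvSingle, List.drop_drop]
          rw [hdd, pvGroups_collapse tokens[i] (tokens.drop (i + 1)) hp (by omega)]
          simp only [Prod.mk.injEq]
          refine ⟨by simp, ?_⟩
          have he : (i + 1 + ((tokens.drop (i + 1)).takeWhile pvSingle).length) - i
              = 1 + ((tokens.drop (i + 1)).takeWhile pvSingle).length := by omega
          rw [he]
          push_cast
          ring
        · rw [dif_neg h3, ih _ _ _ (by omega),
            pvGroups_cons tokens[i] (tokens.drop (i + 1)) (Or.inr (by simp; omega))]
          simp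
      · rw [if_neg hp, ih _ _ _ (by omega),
          pvGroups_cons tokens[i] (tokens.drop (i + 1)) (Or.inl (Bool.eq_false_iff.mpr hp))]
        simp
    · rw [pvLoopA, dif_neg (by omega), List.drop_eq_nil_of_le (by omega)]
      simp [pvGroups]

-- B-side: the zipped triple list pvEmitB walks over
def pvS (l : List String) : List (String × Bool × Nat) :=
  l.zip ((l.map pvSingle).zip (pvRunlenB (l.map pvSingle)))

-- the head of the DP array is the run length of the whole list
lemma pvRunlenB_head (ts : List String) :
    (pvRunlenB (ts.map pvSingle)).headD 0 = (ts.takeWhile pvSingle).length := by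
  induction ts with
  | nil => rfl
  | cons u rest ih =>
    cases h : pvSingle u with
    | false =>
      simp only [List.map_cons, pvRunlenB, h, List.headD_cons, List.takeWhile_cons]
      simp
    | true =>
      simp only [List.map_cons, pvRunlenB, h, if_true, List.headD_cons,
        List.takeWhile_cons, List.length_cons]
      rw [ih]

lemma pvS_cons (t : String) (ts : List String) :
    pvS (t :: ts) = (t, pvSingle t, ((t :: ts).takeWhile pvSingle).length) :: pvS ts := by
  simp only [pvS, List.map_cons, pvRunlenB, List.zip_cons_cons, List.takeWhile_cons]
  rw [pvRunlenB_head]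
  cases h : pvSingle t <;> simp [h]

-- the head of a dropWhile never satisfies the predicate (match form of head?_dropWhile_not)
lemma pv_head_dropWhile (l : List String) :
    ∀ u ∈ (l.dropWhile pvSingle).head?, pvSingle u = false := by
  intro u hu
  have h := List.head?_dropWhile_not pvSingle l
  cases hd : (l.dropWhile pvSingle).head? with
  | none => simp [hd] at hu
  | some v =>
    rw [hd] at h hu
    simp only [Option.mem_def, Option.some.injEq] at hu
    subst hu
    exact h

-- with prev_flag = true, pvEmitB consumes the whole leading run at once:
-- every member sees full = L; it is emitted verbatim if L < 3, counted and dropped otherwise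
lemma pvEmitB_run (ts : List String) : ∀ (L : Nat) (out : List String) (repl : Int),
    pvEmitB (pvS ts) true L out repl =
      if 3 ≤ L then
        pvEmitB (pvS (ts.dropWhile pvSingle)) true L out
          (repl + ((ts.takeWhile pvSingle).length : Int))
      else
        pvEmitB (pvS (ts.dropWhile pvSingle)) true L (out ++ ts.takeWhile pvSingle) repl := by
  induction ts with
  | nil => intro L out repl; split_ifs <;> simp [pvS, pvEmitB]
  | cons u rest ih =>
    intro L out repl
    cases hu : pvSingle u with
    | false =>
      simp only [List.takeWhile_cons, List.dropWhile_cons, hu, Bool.false_eq_true, if_false]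
      split_ifs <;> simp
    | true =>
      rw [pvS_cons]
      simp only [pvEmitB, List.takeWhile_cons, List.dropWhile_cons, hu, if_true,
        List.length_cons]
      by_cases h3 : 3 ≤ L
      · rw [if_neg (by simp; omega), if_neg (by simp), ih L out (repl + 1),
          if_pos h3, if_pos h3]
        congr 1
        push_cast
        ring
      · rw [if_pos (Or.inr (by omega)), ih L (out ++ [u]) repl, if_neg h3, if_neg h3]
        simp

-- main B-side lemma: from a state whose head is not inside a pending run,
-- pvEmitB computes pvGroups, accumulated
lemma pvEmitB_eq (m : Nat) : ∀ (l : List String) (pf : Bool) (pv : Nat)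
    (out : List String) (repl : Int), l.length ≤ m →
    (pf = true → ∀ u ∈ l.head?, pvSingle u = false) →
    pvEmitB (pvS l) pf pv out repl
      = (out ++ (pvGroups l).1, repl + (pvGroups l).2) := by
  induction m with
  | zero =>
    intro l pf pv out repl hm _
    have : l = [] := by cases l <;> simp_all
    subst this
    simp [pvS, pvEmitB, pvGroups]
  | succ m ih =>
    intro l pf pv out repl hm hH
    cases l with
    | nil => simp [pvS, pvEmitB, pvGroups]
    | cons t rest =>
      have hm' : rest.length ≤ m := by simp at hm; omega
      have hd : (rest.dropWhile pvSingle).length ≤ m :=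
        le_trans (List.Sublist.length_le (List.dropWhile_sublist _)) hm'
      rw [pvS_cons, pvEmitB]
      cases ht : pvSingle t with
      | false =>
        rw [if_pos (Or.inl rfl), ih rest false _ _ _ hm' (by simp),
          pvGroups_cons t rest (Or.inl ht)]
        simp
      | true =>
        have hpf : pf = false := by
          cases pf
          · rfl
          · exact absurd (hH rfl t (by simp)) (by simp [ht])
        subst hpf
        simp only [List.takeWhile_cons, ht, if_true, Bool.false_eq_true, if_false,
          List.length_cons]
        set k := (rest.takeWhile pvSingle).length with hk
        by_cases h3 : 3 ≤ k + 1
        · rw [if_neg (by simp; omega), pvEmitB_run rest (k + 1) _ _,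
            if_pos h3,
            ih (rest.dropWhile pvSingle) true _ _ _ hd
              (fun _ => pv_head_dropWhile rest),
            pvGroups_collapse t rest ht (by omega)]
          simp only [Prod.mk.injEq]
          refine ⟨by simp, ?_⟩
          push_cast
          ring
        · rw [if_pos (Or.inr (by omega)), pvEmitB_run rest (k + 1) _ _, if_neg h3,
            ih (rest.dropWhile pvSingle) true _ _ _ hd
              (fun _ => pv_head_dropWhile rest)]
          have key : (fun x => pvSingle x == pvSingle t) = pvSingle := by
            funext x; rw [ht]; simp
          rw [pvGroups_cons_eq]
          simp only [key]
          rw [if_neg (by simp [ht]; omega)]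
          simp

-- ===== VERDICT (by name: the statement is the Claim_ definition above) =====
theorem collapse_single_char_runs_py_spec : Claim_equal_collapse_single_char_runs_py := by
  intro tokens func_words _
  unfold Spec_collapse_single_char_runs_py collapse_single_char_runs_py collapse_single_char_runs_py_alt
  rw [pvLoopA_eq tokens tokens.length 0 [] 0 (by omega)]
  show _ = pvEmitB (pvS tokens) false 0 [] 0
  rw [pvEmitB_eq tokens.length tokens false 0 [] 0 le_rfl (by simp)]
  simp
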